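-- pv_equiv track=rewrite | github.com/fkie-cad/ipal_transcriber | transcribers/ais.py | _dearmor_ascii
-- ===== SOURCE A (Python) =====
-- from typing import Any, Dict, List
--
-- def _dearmor_ascii(payload: str, fill_bits: int) -> List[int]:
--     """
--     remove the ASCII armoring from the raw data string
--     returns the dearmored bit string as a List of bits
--     """
--
--     output = [0] * (len(payload) * 6)
--     index = 0
--
--     for char in payload:
--         byte = ord(char) - 48
--         byte = byte if byte < 40 else byte - 8
--
--         for i in range(6):
--             output[index + 5 - i] = byte % 2
--             byte >>= 1
--         index += 6
--
--     if fill_bits > 0: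
--         output = output[:-fill_bits]
--     return output
-- ===== SOURCE B (Python) =====
-- def _dearmor_ascii(payload: str, fill_bits: int):
--     """
--     remove the ASCII armoring from the raw data string
--     returns the dearmored bit string as a List of bits
--     """
--     # first pass: pack all 6-bit codes into one big integer
--     value = 0
--     for char in payload:
--         code = ord(char) - 48
--         if code >= 40:
--             code -= 8
--         value = (value << 6) | (code & 0x3F)
--     # second pass: render the bits of that integer, MSB first
--     bits = [(value >> k) & 1 for k in range(len(payload) * 6 - 1, -1, -1)]
--     if fill_bits > 0:
--         bits = bits[:-fill_bits]
--     return bits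
-- ===== Notes on version B (the rewrite author's own statement) =====
-- stated objective: alternative
-- what changed: A writes 6 bits per character into a pre-allocated array with an inner shift-and-mod loop and index arithmetic; B instead folds the whole payload into one big integer of 6-bit groups in a first pass and renders all its bits MSB-first in a second pass.
import Mathlib
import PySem

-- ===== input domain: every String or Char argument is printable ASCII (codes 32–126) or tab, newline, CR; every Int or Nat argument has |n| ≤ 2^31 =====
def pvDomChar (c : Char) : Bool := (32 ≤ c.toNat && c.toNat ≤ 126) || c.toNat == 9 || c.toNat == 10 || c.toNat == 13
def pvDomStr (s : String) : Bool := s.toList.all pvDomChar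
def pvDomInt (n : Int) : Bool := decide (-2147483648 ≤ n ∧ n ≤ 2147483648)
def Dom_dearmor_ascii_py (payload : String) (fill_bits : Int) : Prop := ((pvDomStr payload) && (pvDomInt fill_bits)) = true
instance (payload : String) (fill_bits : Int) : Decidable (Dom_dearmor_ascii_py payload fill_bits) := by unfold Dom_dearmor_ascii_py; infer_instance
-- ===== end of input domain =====

-- B replaces A's per-character in-place bit writes by a two-pass scheme: first fold the whole
-- payload into one big integer of 6-bit groups, then render all its bits MSB-first in a second pass.


-- ===== PORT A =====
-- inner `for i in range(6)` loop: state is (output, byte); writes output[index+5-i] = byte % 2, byte >>= 1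
def pvAInner (index : Nat) (st : List Int × Int) : List Int × Int :=
  (List.range 6).foldl
    (fun (s : List Int × Int) i =>
      (s.1.set (index + 5 - i) (PySem.Int.mod s.2 2), PySem.Int.floordiv s.2 2))
    st

-- body of `for char in payload`: state is (output, index)
def pvAStep (st : List Int × Nat) (char : Char) : List Int × Nat :=
  let byte : Int := (char.toNat : Int) - 48
  let byte := if byte < 40 then byte else byte - 8
  let inner := pvAInner st.2 (st.1, byte)
  (inner.1, st.2 + 6)

def dearmor_ascii_py (payload : String) (fill_bits : Int) : List Int :=
  let output := (payload.toList.foldl pvAStep (List.replicate (payload.toList.length * 6) 0, 0)).1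
  if fill_bits > 0 then PySem.List.slice output none (some (-fill_bits)) else output

-- ===== PORT B =====
def dearmor_ascii_py_alt (payload : String) (fill_bits : Int) : List Int :=
  -- first pass: value = (value << 6) | (code & 0x3F) per character
  let value := payload.toList.foldl
    (fun (value : Int) char =>
      let code : Int := (char.toNat : Int) - 48
      let code := if code ≥ 40 then code - 8 else code
      PySem.Int.bor (value <<< (6 : Nat)) (PySem.Int.band code 63))
    0
  -- second pass: bits = [(value >> k) & 1 for k in range(len(payload)*6 - 1, -1, -1)]
  -- every k this countdown range yields is ≥ 0, so `.toNat` is exact for Python's `value >> k`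
  let bits := (PySem.List.pyRange ((payload.toList.length : Int) * 6 - 1) (-1) (-1)).map
    (fun k => PySem.Int.band (value >>> k.toNat) 1)
  if fill_bits > 0 then PySem.List.slice bits none (some (-fill_bits)) else bits

-- ===== PRECONDITION & SPEC =====
def Spec_dearmor_ascii_py (payload : String) (fill_bits : Int) (out : List Int) : Prop := out = dearmor_ascii_py_alt payload fill_bits
instance (payload : String) (fill_bits : Int) (out : List Int) : Decidable (Spec_dearmor_ascii_py payload fill_bits out) := by unfold Spec_dearmor_ascii_py; infer_instance

-- ===== CLAIM (what is proved, stated in full; the proofs are below) =====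
def Claim_equal_dearmor_ascii_py : Prop := ∀ (payload : String) (fill_bits : Int), Dom_dearmor_ascii_py payload fill_bits → Spec_dearmor_ascii_py payload fill_bits (dearmor_ascii_py payload fill_bits)

-- ===== LEMMAS AND PROOFS =====

-- the adjusted 6-bit code of a character, single bits, and the per-character bit block
def pvAdj (c : Char) : Int :=
  let b : Int := (c.toNat : Int) - 48
  if b < 40 then b else b - 8

def pvBit (v : Int) (k : Nat) : Int := (v / 2 ^ k) % 2

def pvBlock (c : Char) : List Int :=
  [pvBit (pvAdj c) 5, pvBit (pvAdj c) 4, pvBit (pvAdj c) 3,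
   pvBit (pvAdj c) 2, pvBit (pvAdj c) 1, pvBit (pvAdj c) 0]

theorem pv_set_shift (pre l : List Int) (j : Nat) (a : Int) :
    (pre ++ l).set (pre.length + j) a = pre ++ l.set j a := by
  rw [List.set_append]; simp

theorem pv_idx1 (p : Nat) : p + 5 - 1 = p + 4 := by omega
theorem pv_idx2 (p : Nat) : p + 5 - 2 = p + 3 := by omega
theorem pv_idx3 (p : Nat) : p + 5 - 3 = p + 2 := by omega
theorem pv_idx4 (p : Nat) : p + 5 - 4 = p + 1 := by omega
theorem pv_idx5 (p : Nat) : p + 5 - 5 = p + 0 := by omega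

theorem pv_inner_eq (pre rest : List Int) (b : Int) :
    (pvAInner pre.length (pre ++ ([0,0,0,0,0,0] ++ rest), b)).1
      = pre ++ ([pvBit b 5, pvBit b 4, pvBit b 3, pvBit b 2, pvBit b 1, pvBit b 0] ++ rest) := by
  have h6 : List.range 6 = [0,1,2,3,4,5] := by decide
  simp only [pvAInner, h6, List.foldl_cons, List.foldl_nil, Nat.sub_zero,
    pv_idx1, pv_idx2, pv_idx3, pv_idx4, pv_idx5,
    PySem.Int.floordiv_eq_ediv_of_pos (show (0:ℤ) < 2 by norm_num),
    PySem.Int.mod_eq_emod_of_pos (show (0:ℤ) < 2 by norm_num),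
    pv_set_shift]
  simp only [List.cons_append, List.nil_append, List.set_cons_succ, List.set_cons_zero]
  simp only [pvBit, List.append_cancel_left_eq, List.cons.injEq, and_true]
  norm_num
  omega

theorem pv_A_loop (cs : List Char) :
    ∀ pre : List Int,
      (cs.foldl pvAStep (pre ++ List.replicate (cs.length * 6) 0, pre.length)).1
        = pre ++ cs.flatMap pvBlock := by
  induction cs with
  | nil => intro pre; simp
  | cons c cs ih =>
    intro pre
    have hrep : List.replicate ((c :: cs).length * 6) (0 : Int)
        = [0,0,0,0,0,0] ++ List.replicate (cs.length * 6) 0 := by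
      have h : (c :: cs).length * 6 = 6 + cs.length * 6 := by simp [List.length_cons]; ring
      rw [h, List.replicate_add]; rfl
    rw [hrep, List.foldl_cons]
    have hstep : pvAStep (pre ++ ([0,0,0,0,0,0] ++ List.replicate (cs.length * 6) 0), pre.length) c
        = (pre ++ (pvBlock c ++ List.replicate (cs.length * 6) 0), pre.length + 6) := by
      simp only [pvAStep]
      refine Prod.ext ?_ rfl
      rw [pv_inner_eq]
      simp [pvBlock, pvAdj]
    rw [hstep]
    have hlen : pre.length + 6 = (pre ++ pvBlock c).length := by simp [pvBlock]
    rw [show pre ++ (pvBlock c ++ List.replicate (cs.length * 6) 0)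
          = (pre ++ pvBlock c) ++ List.replicate (cs.length * 6) 0 by simp, hlen,
        ih (pre ++ pvBlock c)]
    simp

-- ---- B-side lemmas ----

def pvD (c : Char) : Int := pvAdj c % 64

def pvN (cs : List Char) : Int := cs.foldl (fun v c => v * 64 + pvD c) 0

def pvRender (v : Int) (m : Nat) : List Int := (List.range m).map (fun k => pvBit v (m - 1 - k))

theorem pv_band63 (a : Int) : PySem.Int.band a 63 = a % 64 := by
  have h1 : ∀ n : Nat, n &&& 63 = n % 64 := fun n => by
    have := Nat.and_two_pow_sub_one_eq_mod n 6; norm_num at this; omega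
  unfold PySem.Int.band
  rcases a with n | n
  · simp only [Int.ofNat_eq_natCast, if_pos (by positivity : (0:ℤ) ≤ (n:ℤ)),
      if_pos (by norm_num : (0:ℤ) ≤ 63)]
    rw [show ((n : ℤ)).toNat = n by omega, show ((63 : ℤ)).toNat = 63 from rfl, h1]
    omega
  · simp only [if_neg (by omega : ¬ (0:ℤ) ≤ Int.negSucc n), if_pos (by norm_num : (0:ℤ) ≤ 63)]
    have hneg : (-(Int.negSucc n) - 1).toNat = n := by
      rw [Int.negSucc_eq]; omega
    rw [hneg, show ((63 : ℤ)).toNat = 63 from rfl, Nat.land_comm, h1,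
        Int.negSucc_eq]
    omega

theorem pv_bor_step (v b : Int) (hv : 0 ≤ v) (hb : 0 ≤ b) (hb64 : b < 64) :
    PySem.Int.bor (v <<< (6 : Nat)) b = v * 64 + b := by
  have hsl : v <<< (6 : Nat) = v * 64 := by rw [Int.shiftLeft_eq]; norm_num
  rw [hsl, PySem.Int.bor_of_nonneg (by positivity) hb]
  have hB : b.toNat < 64 := by omega
  have hvn : (v * 64).toNat = v.toNat * 64 := by omega
  rw [hvn]
  have hnat : v.toNat * 64 ||| b.toNat = v.toNat * 64 + b.toNat := by
    have h : v.toNat * 64 = v.toNat <<< 6 := by simp [Nat.shiftLeft_eq]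
    have hlt : b.toNat < 2 ^ 6 := by omega
    rw [h, ← Nat.shiftLeft_add_eq_or_of_lt hlt]
  rw [hnat]
  omega

theorem pv_value_eq (cs : List Char) : ∀ v : Int, 0 ≤ v →
    cs.foldl
      (fun (value : Int) char =>
        let code : Int := (char.toNat : Int) - 48
        let code := if code ≥ 40 then code - 8 else code
        PySem.Int.bor (value <<< (6 : Nat)) (PySem.Int.band code 63)) v
    = cs.foldl (fun v c => v * 64 + pvD c) v := by
  induction cs with
  | nil => intro v _; rfl
  | cons c cs ih =>
    intro v hv
    have hcode : (if ((c.toNat : Int) - 48) ≥ 40 then ((c.toNat : Int) - 48) - 8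
                  else ((c.toNat : Int) - 48)) = pvAdj c := by
      simp only [pvAdj]; split_ifs <;> omega
    have hd0 : 0 ≤ pvD c := Int.emod_nonneg _ (by norm_num)
    have hd64 : pvD c < 64 := Int.emod_lt_of_pos _ (by norm_num)
    simp only [List.foldl_cons]
    rw [show PySem.Int.bor (v <<< (6 : Nat))
          (PySem.Int.band (if ((c.toNat : Int) - 48) ≥ 40 then ((c.toNat : Int) - 48) - 8
                           else ((c.toNat : Int) - 48)) 63) = v * 64 + pvD c by
        rw [hcode, pv_band63]
        exact pv_bor_step v (pvD c) hv hd0 hd64]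
    exact ih (v * 64 + pvD c) (by omega)

theorem pvBit_add6 (w : Int) (j : Nat) : pvBit w (j + 6) = pvBit (w / 64) j := by
  simp only [pvBit]
  rw [Int.ediv_ediv_of_nonneg (by norm_num : (0:ℤ) ≤ 64)]
  have h : (2:ℤ) ^ (j + 6) = 64 * 2 ^ j := by
    rw [pow_add, mul_comm]; norm_num
  rw [h]

theorem pvRender_step (v d : Int) (m : Nat) (hd : 0 ≤ d) (hd64 : d < 64) :
    pvRender (v * 64 + d) (m + 6)
      = pvRender v m ++ [pvBit d 5, pvBit d 4, pvBit d 3, pvBit d 2, pvBit d 1, pvBit d 0] := by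
  have hdiv : (v * 64 + d) / 64 = v := by omega
  simp only [pvRender, List.range_add, List.map_append, List.map_map]
  congr 1
  · apply List.map_congr_left
    intro k hk
    have hk' : k < m := List.mem_range.mp hk
    have hidx : m + 6 - 1 - k = (m - 1 - k) + 6 := by omega
    rw [hidx, pvBit_add6, hdiv]
  · have hb : ∀ j : Nat, j < 6 → pvBit (v * 64 + d) j = pvBit d j := by
      intro j hj
      interval_cases j <;> (simp only [pvBit]; omega)
    have hfun : ∀ k ∈ List.range 6,
        ((fun k => pvBit (v * 64 + d) (m + 6 - 1 - k)) ∘ (fun k => m + k)) k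
          = pvBit d (5 - k) := by
      intro k hk
      have hk6 : k < 6 := List.mem_range.mp hk
      simp only [Function.comp_apply]
      rw [show m + 6 - 1 - (m + k) = 5 - k by omega]
      exact hb (5 - k) (by omega)
    rw [List.map_congr_left hfun]
    rfl

theorem pv_block_emod (c : Char) :
    [pvBit (pvD c) 5, pvBit (pvD c) 4, pvBit (pvD c) 3,
     pvBit (pvD c) 2, pvBit (pvD c) 1, pvBit (pvD c) 0] = pvBlock c := by
  have hb : ∀ j : Nat, j < 6 → pvBit (pvD c) j = pvBit (pvAdj c) j := by
    intro j hj
    interval_cases j <;> (simp only [pvBit, pvD]; omega)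
  simp only [pvBlock]
  rw [hb 5 (by norm_num), hb 4 (by norm_num), hb 3 (by norm_num),
      hb 2 (by norm_num), hb 1 (by norm_num), hb 0 (by norm_num)]

theorem pv_render_flatMap (cs : List Char) :
    pvRender (pvN cs) (cs.length * 6) = cs.flatMap pvBlock := by
  induction cs using List.reverseRecOn with
  | nil => rfl
  | append_singleton cs c ih =>
    have hN : pvN (cs ++ [c]) = pvN cs * 64 + pvD c := by
      simp [pvN, List.foldl_append]
    have hlen : (cs ++ [c]).length * 6 = cs.length * 6 + 6 := by
      simp only [List.length_append, List.length_cons, List.length_nil]; omega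
    have hd0 : 0 ≤ pvD c := Int.emod_nonneg _ (by norm_num)
    have hd64 : pvD c < 64 := Int.emod_lt_of_pos _ (by norm_num)
    rw [hN, hlen,
        pvRender_step (pvN cs) (pvD c) (cs.length * 6) hd0 hd64,
        ih, pv_block_emod, List.flatMap_append]
    simp [pvBlock]

theorem pv_bits_eq_render (v : Int) (L : Nat) :
    (PySem.List.pyRange ((L : Int) * 6 - 1) (-1) (-1)).map
        (fun k => PySem.Int.band (v >>> k.toNat) 1)
      = pvRender v (L * 6) := by
  rw [PySem.List.pyRange_neg_one]
  have hcnt : (((L : Int) * 6 - 1) - (-1)).toNat = L * 6 := by omega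
  rw [hcnt, List.map_map, pvRender]
  apply List.map_congr_left
  intro k hk
  have hk' : k < L * 6 := List.mem_range.mp hk
  have hto : (((L : Int) * 6 - 1) - (k : Int)).toNat = L * 6 - 1 - k := by omega
  simp only [Function.comp_apply, hto, PySem.Int.band_one,
    PySem.Int.mod_eq_emod_of_pos (show (0:ℤ) < 2 by norm_num),
    Int.shiftRight_natCast_right, Int.shiftRight_eq_div_pow, pvBit]
  norm_cast

theorem pv_main (payload : String) (fill_bits : Int) :
    dearmor_ascii_py payload fill_bits = dearmor_ascii_py_alt payload fill_bits := by
  simp only [dearmor_ascii_py, dearmor_ascii_py_alt]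
  have hA : (payload.toList.foldl pvAStep (List.replicate (payload.toList.length * 6) 0, 0)).1
      = payload.toList.flatMap pvBlock := by
    simpa using pv_A_loop payload.toList []
  rw [hA, pv_value_eq payload.toList 0 le_rfl,
      show List.foldl (fun v c => v * 64 + pvD c) 0 payload.toList = pvN payload.toList from rfl,
      pv_bits_eq_render, pv_render_flatMap]

-- ===== VERDICT (by name: the statement is the Claim_ definition above) =====
theorem dearmor_ascii_py_spec : Claim_equal_dearmor_ascii_py := by
  intro payload fill_bits _
  unfold Spec_dearmor_ascii_py
  exact pv_main payload fill_bits
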